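-- pv_equiv track=rewrite | github.com/hyeonje-im/CapstoneDesign_Merge | OpenCV/code/cbs_tester3.py | expand_to_unit_steps
-- ===== SOURCE A (Python) =====
-- def expand_to_unit_steps(path):
--     out = []
--     if not path: return out
--     out.append(path[0]) # 시작점은 항상 추가
--
--     for i in range(len(path) - 1):
--         r1, c1 = path[i]
--         r2, c2 = path[i+1]
--
--         # 만약 시작점과 도착점이 같다면 (제자리 대기 명령)
--         if (r1, c1) == (r2, c2):
--             out.append((r2, c2)) # 대기 위치를 경로에 명시적으로 추가
--             continue # 다음 루프로 이동
--
--         # 기존의 이동 경로 확장 로직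
--         dr = 0 if r2 == r1 else (1 if r2 > r1 else -1)
--         dc = 0 if c2 == c1 else (1 if c2 > c1 else -1)
--
--         if dr != 0 and dc != 0:
--             raise ValueError(f"Diagonal segment in path: {path[i]}->{path[i+1]}")
--
--         rr, cc = r1, c1
--         while (rr, cc) != (r2, c2):
--             rr += dr
--             cc += dc
--             out.append((rr, cc))
--
--     return out
-- ===== SOURCE B (Python) =====
-- def expand_to_unit_steps(path):
--     # pass 1: validate the whole path (diagonal segments are an error)
--     for (r1, c1), (r2, c2) in zip(path, path[1:]):
--         if r1 != r2 and c1 != c2: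
--             raise ValueError(f"Diagonal segment in path: {(r1, c1)}->{(r2, c2)}")
--     if not path:
--         return []
--     # pass 2: build the answer back-to-front, walking the segments in reverse;
--     # each segment contributes its points (start, end] in reversed order via range()
--     rev = []
--     for (r1, c1), (r2, c2) in reversed(list(zip(path, path[1:]))):
--         if (r1, c1) == (r2, c2):
--             rev.append((r2, c2))
--         elif r1 == r2:
--             rev.extend((r1, c) for c in range(c2, c1, 1 if c1 > c2 else -1))
--         else:
--             rev.extend((r, c1) for r in range(r2, r1, 1 if r1 > r2 else -1))
--     rev.append(path[0])
--     rev.reverse()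
--     return rev
-- ===== Notes on version B (the rewrite author's own statement) =====
-- stated objective: alternative
-- what changed: B is restructured into two staged passes: it first validates the whole path (raising on any diagonal segment), then builds the output back-to-front by walking the segments in reverse and emitting each segment's points in descending order with range() over the moving coordinate, finishing with a single reversal - no per-step accumulator or tuple-equality loop.
import Mathlib
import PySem

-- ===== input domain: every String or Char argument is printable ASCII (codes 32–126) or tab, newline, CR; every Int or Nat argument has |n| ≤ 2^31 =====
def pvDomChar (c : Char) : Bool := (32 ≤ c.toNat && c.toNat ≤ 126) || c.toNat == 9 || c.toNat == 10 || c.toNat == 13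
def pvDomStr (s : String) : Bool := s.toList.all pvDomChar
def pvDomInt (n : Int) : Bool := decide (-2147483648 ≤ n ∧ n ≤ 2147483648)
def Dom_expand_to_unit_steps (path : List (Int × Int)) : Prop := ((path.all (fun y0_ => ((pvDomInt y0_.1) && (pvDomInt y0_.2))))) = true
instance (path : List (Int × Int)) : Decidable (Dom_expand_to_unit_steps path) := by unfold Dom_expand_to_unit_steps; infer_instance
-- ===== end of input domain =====

-- B is a different decomposition: a separate validation pass, then the output is built
-- BACK-TO-FRONT by walking the segments in reverse and emitting each segment's points via
-- range() in descending order, with one final reversal; alternative, same cost.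


-- ===== PORT A =====
-- the inner 'while (rr, cc) != (r2, c2)' loop; the fuel argument only makes it total (inside
-- Pre_ the guard goes false after exactly (r2-r1).natAbs + (c2-c1).natAbs iterations, so the
-- fuel never cuts the loop short there)
def pvWhileA (r2 c2 dr dc : Int) : Nat → Int → Int → List (Int × Int) → List (Int × Int)
  | 0, _, _, out => out
  | n + 1, rr, cc, out =>
    if (rr, cc) ≠ (r2, c2) then
      pvWhileA r2 c2 dr dc n (rr + dr) (cc + dc) (out ++ [(rr + dr, cc + dc)])
    else out

-- the 'for i in range(len(path)-1)' loop, as the obvious recursion over consecutive pairs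
def pvLoopA : List (Int × Int) → List (Int × Int) → List (Int × Int)
  | out, p :: q :: rest =>
    if p = q then pvLoopA (out ++ [q]) (q :: rest)      -- wait-in-place branch
    else
      let dr : Int := if q.1 = p.1 then 0 else if q.1 > p.1 then 1 else -1
      let dc : Int := if q.2 = p.2 then 0 else if q.2 > p.2 then 1 else -1
      if dr ≠ 0 ∧ dc ≠ 0 then out                      -- Python: raise ValueError (excluded by Pre_)
      else
        pvLoopA (pvWhileA q.1 q.2 dr dc ((q.1 - p.1).natAbs + (q.2 - p.2).natAbs) p.1 p.2 out)
                (q :: rest)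
  | out, _ => out

def expand_to_unit_steps (path : List (Int × Int)) : List (Int × Int) :=
  match path with
  | [] => []
  | p0 :: rest => pvLoopA [p0] (p0 :: rest)

-- ===== PORT B =====
-- one segment, emitted in REVERSED order (Source B's loop body): the points (start, end] of the
-- segment, back to front, via range() over the moving coordinate
def pvSegRevB (r1 c1 r2 c2 : Int) : List (Int × Int) :=
  if (r1, c1) = (r2, c2) then [(r2, c2)]
  else if r1 = r2 then (PySem.List.pyRange c2 c1 (if c1 > c2 then 1 else -1)).map (fun c => (r1, c))
  else (PySem.List.pyRange r2 r1 (if r1 > r2 then 1 else -1)).map (fun r => (r, c1))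

def expand_to_unit_steps_alt (path : List (Int × Int)) : List (Int × Int) :=
  -- pass 1: validation over all consecutive pairs (Python raises ValueError on a diagonal;
  -- excluded by Pre_, the port returns [] there)
  if (path.zip path.tail).all (fun pq => pq.1.1 == pq.2.1 || pq.1.2 == pq.2.2) then
    match path with
    | [] => []
    | p0 :: _ =>
      -- pass 2: build the reversed answer, then reverse once
      let rev := ((path.zip path.tail).reverse).foldl
        (fun acc pq => acc ++ pvSegRevB pq.1.1 pq.1.2 pq.2.1 pq.2.2) []
      (rev ++ [p0]).reverse
  else []

-- ===== PRECONDITION & SPEC =====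
-- Pre_ excludes exactly the paths with a diagonal consecutive segment (both coordinates change),
-- on which A raises ValueError (and B does too).
def Pre_expand_to_unit_steps (path : List (Int × Int)) : Prop :=
  ((path.zip path.tail).all (fun pq => pq.1.1 == pq.2.1 || pq.1.2 == pq.2.2)) = true
instance (path : List (Int × Int)) : Decidable (Pre_expand_to_unit_steps path) := by
  unfold Pre_expand_to_unit_steps; infer_instance
def pvWitness_expand_to_unit_steps : (List (Int × Int)) := [(0, 0), (0, 2), (0, 2), (1, 2)]

def Spec_expand_to_unit_steps (path : List (Int × Int)) (out : List (Int × Int)) : Prop := out = expand_to_unit_steps_alt path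
instance (path : List (Int × Int)) (out : List (Int × Int)) : Decidable (Spec_expand_to_unit_steps path out) := by unfold Spec_expand_to_unit_steps; infer_instance

-- ===== CLAIM (what is proved, stated in full; the proofs are below) =====
def Claim_equal_expand_to_unit_steps : Prop := ∀ (path : List (Int × Int)), Dom_expand_to_unit_steps path → Pre_expand_to_unit_steps path → Spec_expand_to_unit_steps path (expand_to_unit_steps path)

-- ===== LEMMAS AND PROOFS =====

-- proof-side closed form of one segment's FORWARD points, shared target of both programs
def pvSegFwd (r1 c1 r2 c2 : Int) : List (Int × Int) :=
  let dr := r2 - r1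
  let dc := c2 - c1
  if dr ≠ 0 ∧ dc ≠ 0 then []
  else
    let steps := dr.natAbs + dc.natAbs
    if steps = 0 then [(r2, c2)]
    else
      let sr : Int := if dr > 0 then 1 else if dr < 0 then -1 else 0
      let sc : Int := if dc > 0 then 1 else if dc < 0 then -1 else 0
      (List.range steps).map (fun (k : Nat) => (r1 + sr * ((k : Int) + 1), c1 + sc * ((k : Int) + 1)))

-- the while loop with fuel n, stepping by (dr,dc) with exactly one of them ±1,
-- from (r1,c1) to (r1+dr*n, c1+dc*n), appends the closed-form points
theorem pvWhileA_run (dr dc : Int)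
    (h : (dr = 0 ∧ (dc = 1 ∨ dc = -1)) ∨ (dc = 0 ∧ (dr = 1 ∨ dr = -1))) :
    ∀ (n : Nat) (r1 c1 : Int) (out : List (Int × Int)),
      pvWhileA (r1 + dr * n) (c1 + dc * n) dr dc n r1 c1 out
        = out ++ (List.range n).map (fun (k : Nat) => (r1 + dr * ((k : Int) + 1), c1 + dc * ((k : Int) + 1))) := by
  intro n
  induction n with
  | zero => intro r1 c1 out; simp [pvWhileA]
  | succ n ih =>
    intro r1 c1 out
    have hguard : (r1, c1) ≠ (r1 + dr * (↑(n+1) : Int), c1 + dc * (↑(n+1) : Int)) := by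
      intro hEq
      have h1 : r1 = r1 + dr * (↑(n+1) : Int) := congrArg Prod.fst hEq
      have h2 : c1 = c1 + dc * (↑(n+1) : Int) := congrArg Prod.snd hEq
      rcases h with ⟨h0, h1'⟩ | ⟨h0, h1'⟩ <;> rcases h1' with rfl | rfl <;> omega
    rw [pvWhileA, if_pos hguard]
    have harg1 : r1 + dr * (↑(n+1) : Int) = (r1 + dr) + dr * (n : Int) := by push_cast; ring
    have harg2 : c1 + dc * (↑(n+1) : Int) = (c1 + dc) + dc * (n : Int) := by push_cast; ring
    rw [harg1, harg2, ih (r1 + dr) (c1 + dc)]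
    rw [List.range_succ_eq_map]
    simp only [List.map_cons, List.map_map, List.append_assoc, List.singleton_append,
      Nat.cast_zero, zero_add, mul_one]
    refine congrArg (fun t => out ++ (r1 + dr, c1 + dc) :: t) (List.map_congr_left ?_)
    intro k _
    simp only [Function.comp_apply, Prod.mk.injEq]
    constructor <;> (push_cast; ring)

-- the closed form, for a straight move of n > 0 unit steps
theorem pvSegFwd_closed (dr dc : Int)
    (h : (dr = 0 ∧ (dc = 1 ∨ dc = -1)) ∨ (dc = 0 ∧ (dr = 1 ∨ dr = -1)))
    (n : Nat) (hn : 0 < n) (r1 c1 : Int) :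
    pvSegFwd r1 c1 (r1 + dr * n) (c1 + dc * n)
      = (List.range n).map (fun (k : Nat) => (r1 + dr * ((k : Int) + 1), c1 + dc * ((k : Int) + 1))) := by
  have hpos : (0 : Int) < (n : Int) := by exact_mod_cast hn
  rcases h with ⟨rfl, hd⟩ | ⟨rfl, hd⟩ <;> rcases hd with rfl | rfl <;>
    · simp only [pvSegFwd]
      rw [if_neg (by rintro ⟨h1, h2⟩; omega)]
      rw [if_neg (by omega)]
      rw [show ((r1 + _ * (n:Int)) - r1).natAbs + ((c1 + _ * (n:Int)) - c1).natAbs = n from by omega]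
      apply List.map_congr_left
      intro k _
      have hn1 : ¬ (-(n:Int) > 0) := by omega
      have hn2 : (-(n:Int)) < 0 := by omega
      simp only [zero_mul, add_zero, one_mul, neg_mul, sub_self, add_sub_cancel_left]
      simp
      try intro h
      try split_ifs <;> omega

-- one non-wait, non-diagonal segment: A's while loop produces exactly the closed form
theorem pvSeg_eq (p q : Int × Int) (hR : p.1 = q.1 ∨ p.2 = q.2) (hne : p ≠ q)
    (out : List (Int × Int)) :
    pvWhileA q.1 q.2
      (if q.1 = p.1 then 0 else if q.1 > p.1 then 1 else -1)
      (if q.2 = p.2 then 0 else if q.2 > p.2 then 1 else -1)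
      ((q.1 - p.1).natAbs + (q.2 - p.2).natAbs) p.1 p.2 out
      = out ++ pvSegFwd p.1 p.2 q.1 q.2 := by
  obtain ⟨r1, c1⟩ := p
  obtain ⟨r2, c2⟩ := q
  dsimp only at hR ⊢
  rcases hR with rfl | rfl
  · -- row fixed: the move is along c
    have hc : c1 ≠ c2 := fun h => hne (by simp [h])
    by_cases hgt : c1 < c2
    · obtain ⟨n, hn, rfl⟩ : ∃ n : Nat, 0 < n ∧ c2 = c1 + 1 * (n : Int) :=
        ⟨(c2 - c1).toNat, by omega, by omega⟩
      have hpos : (0 : Int) < (n : Int) := by exact_mod_cast hn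
      rw [if_pos rfl, if_neg (by omega), if_pos (by omega),
        show (r1 - r1).natAbs + ((c1 + 1 * (n:Int)) - c1).natAbs = n from by omega]
      have hrun := pvWhileA_run 0 1 (Or.inl ⟨rfl, Or.inl rfl⟩) n r1 c1 out
      have hseg := pvSegFwd_closed 0 1 (Or.inl ⟨rfl, Or.inl rfl⟩) n hn r1 c1
      simp only [zero_mul, add_zero] at hrun hseg
      rw [hrun, hseg]
    · obtain ⟨n, hn, rfl⟩ : ∃ n : Nat, 0 < n ∧ c2 = c1 + (-1) * (n : Int) :=
        ⟨(c1 - c2).toNat, by omega, by omega⟩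
      have hpos : (0 : Int) < (n : Int) := by exact_mod_cast hn
      rw [if_pos rfl, if_neg (by omega), if_neg (by omega),
        show (r1 - r1).natAbs + ((c1 + (-1) * (n:Int)) - c1).natAbs = n from by omega]
      have hrun := pvWhileA_run 0 (-1) (Or.inl ⟨rfl, Or.inr rfl⟩) n r1 c1 out
      have hseg := pvSegFwd_closed 0 (-1) (Or.inl ⟨rfl, Or.inr rfl⟩) n hn r1 c1
      simp only [zero_mul, add_zero] at hrun hseg
      rw [hrun, hseg]
  · -- column fixed: the move is along r
    have hr : r1 ≠ r2 := fun h => hne (by simp [h])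
    by_cases hgt : r1 < r2
    · obtain ⟨n, hn, rfl⟩ : ∃ n : Nat, 0 < n ∧ r2 = r1 + 1 * (n : Int) :=
        ⟨(r2 - r1).toNat, by omega, by omega⟩
      have hpos : (0 : Int) < (n : Int) := by exact_mod_cast hn
      rw [if_neg (by omega), if_pos (by omega), if_pos rfl,
        show ((r1 + 1 * (n:Int)) - r1).natAbs + (c1 - c1).natAbs = n from by omega]
      have hrun := pvWhileA_run 1 0 (Or.inr ⟨rfl, Or.inl rfl⟩) n r1 c1 out
      have hseg := pvSegFwd_closed 1 0 (Or.inr ⟨rfl, Or.inl rfl⟩) n hn r1 c1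
      simp only [zero_mul, add_zero] at hrun hseg
      rw [hrun, hseg]
    · obtain ⟨n, hn, rfl⟩ : ∃ n : Nat, 0 < n ∧ r2 = r1 + (-1) * (n : Int) :=
        ⟨(r1 - r2).toNat, by omega, by omega⟩
      have hpos : (0 : Int) < (n : Int) := by exact_mod_cast hn
      rw [if_neg (by omega), if_neg (by omega), if_pos rfl,
        show ((r1 + (-1) * (n:Int)) - r1).natAbs + (c1 - c1).natAbs = n from by omega]
      have hrun := pvWhileA_run (-1) 0 (Or.inr ⟨rfl, Or.inr rfl⟩) n r1 c1 out
      have hseg := pvSegFwd_closed (-1) 0 (Or.inr ⟨rfl, Or.inr rfl⟩) n hn r1 c1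
      simp only [zero_mul, add_zero] at hrun hseg
      rw [hrun, hseg]

-- A's outer loop equals the flatMap of the closed-form segments over consecutive pairs
theorem pvLoopA_eq : ∀ (rest : List (Int × Int)) (p : Int × Int) (out : List (Int × Int)),
    (((p :: rest).zip rest).all (fun pq => pq.1.1 == pq.2.1 || pq.1.2 == pq.2.2)) = true →
    pvLoopA out (p :: rest)
      = out ++ (List.zip (p :: rest) rest).flatMap (fun pq => pvSegFwd pq.1.1 pq.1.2 pq.2.1 pq.2.2) := by
  intro rest
  induction rest with
  | nil => intro p out _; simp [pvLoopA]
  | cons q rest ih =>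
    intro p out hchain
    rw [List.zip_cons_cons, List.all_cons, Bool.and_eq_true] at hchain
    have hR : p.1 = q.1 ∨ p.2 = q.2 := by
      rcases Bool.or_eq_true _ _ |>.mp hchain.1 with h | h
      · exact Or.inl (by exact_mod_cast beq_iff_eq.mp h)
      · exact Or.inr (by exact_mod_cast beq_iff_eq.mp h)
    by_cases hpq : p = q
    · rw [pvLoopA, if_pos hpq, ih q (out ++ [q]) hchain.2]
      have hseg : pvSegFwd p.1 p.2 q.1 q.2 = [q] := by
        subst hpq
        simp [pvSegFwd]
      rw [List.zip_cons_cons, List.flatMap_cons, hseg]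
      simp
    · rw [pvLoopA, if_neg hpq]
      have hdiag : ¬ ((if q.1 = p.1 then (0:Int) else if q.1 > p.1 then 1 else -1) ≠ 0 ∧
                      (if q.2 = p.2 then (0:Int) else if q.2 > p.2 then 1 else -1) ≠ 0) := by
        rcases hR with h | h <;> simp [h.symm]
      rw [if_neg hdiag]
      rw [pvSeg_eq p q hR hpq out]
      rw [ih q _ hchain.2]
      rw [List.zip_cons_cons, List.flatMap_cons]
      simp

-- reversing a map over List.range flips the index
theorem pvReverseMapRange {α : Type} (n : Nat) (h : Nat → α) :
    ((List.range n).map h).reverse = (List.range n).map (fun k => h (n - 1 - k)) := by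
  apply List.ext_getElem
  · simp
  · intro i h1 h2
    simp only [List.length_map, List.length_range] at h1 h2
    rw [List.getElem_reverse]
    simp only [List.getElem_map, List.getElem_range, List.length_map, List.length_range]

-- flatMap congruence on members
theorem pvFlatMapCongr {α β : Type} {l : List α} {f g : α → List β}
    (h : ∀ x ∈ l, f x = g x) : l.flatMap f = l.flatMap g := by
  induction l with
  | nil => rfl
  | cons a l ih =>
    rw [List.flatMap_cons, List.flatMap_cons, h a (by simp), ih (fun x hx => h x (by simp [hx]))]

-- B\'s reversed segment, reversed, is the closed-form forward segment
theorem pvSegRevB_reverse (r1 c1 r2 c2 : Int) (hR : r1 = r2 ∨ c1 = c2) :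
    (pvSegRevB r1 c1 r2 c2).reverse = pvSegFwd r1 c1 r2 c2 := by
  by_cases heq : (r1, c1) = (r2, c2)
  · injection heq with h1 h2
    subst h1; subst h2
    simp [pvSegRevB, pvSegFwd]
  · rcases hR with rfl | rfl
    · -- row fixed, c1 ≠ c2
      have hc : c1 ≠ c2 := fun h => heq (by simp [h])
      rw [pvSegRevB, if_neg heq, if_pos rfl]
      by_cases hlt : c1 < c2
      · -- moving up: step -1
        rw [if_neg (by omega), PySem.List.pyRange_neg_one_eq_reverse, List.map_reverse,
          List.reverse_reverse, PySem.List.pyRange_one, List.map_map]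
        rw [pvSegFwd]
        rw [if_neg (by simp)]
        rw [if_neg (by simp; omega)]
        rw [show ((c2 + 1) - (c1 + 1)).toNat = (r1 - r1).natAbs + (c2 - c1).natAbs from by omega]
        apply List.map_congr_left
        intro k hk
        rw [List.mem_range] at hk
        simp only [Function.comp_apply, Prod.mk.injEq]
        split_ifs <;> constructor <;> omega
      · -- moving down: step 1
        have hgt : c2 < c1 := by omega
        rw [if_pos (by omega), PySem.List.pyRange_one, List.map_map, pvReverseMapRange]
        rw [pvSegFwd]
        rw [if_neg (by simp)]
        rw [if_neg (by simp; omega)]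
        rw [show (c1 - c2).toNat = (r1 - r1).natAbs + (c2 - c1).natAbs from by omega]
        apply List.map_congr_left
        intro k hk
        rw [List.mem_range] at hk
        simp only [Function.comp_apply, Prod.mk.injEq]
        split_ifs <;> constructor <;> omega
    · -- column fixed, r1 ≠ r2
      have hr : r1 ≠ r2 := fun h => heq (by simp [h])
      rw [pvSegRevB, if_neg heq, if_neg hr]
      by_cases hlt : r1 < r2
      · rw [if_neg (by omega), PySem.List.pyRange_neg_one_eq_reverse, List.map_reverse,
          List.reverse_reverse, PySem.List.pyRange_one, List.map_map]
        rw [pvSegFwd]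
        rw [if_neg (by simp)]
        rw [if_neg (by simp; omega)]
        rw [show ((r2 + 1) - (r1 + 1)).toNat = (r2 - r1).natAbs + (c1 - c1).natAbs from by omega]
        apply List.map_congr_left
        intro k hk
        rw [List.mem_range] at hk
        simp only [Function.comp_apply, Prod.mk.injEq]
        split_ifs <;> constructor <;> omega
      · have hgt : r2 < r1 := by omega
        rw [if_pos (by omega), PySem.List.pyRange_one, List.map_map, pvReverseMapRange]
        rw [pvSegFwd]
        rw [if_neg (by simp)]
        rw [if_neg (by simp; omega)]
        rw [show (r1 - r2).toNat = (r2 - r1).natAbs + (c1 - c1).natAbs from by omega]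
        apply List.map_congr_left
        intro k hk
        rw [List.mem_range] at hk
        simp only [Function.comp_apply, Prod.mk.injEq]
        split_ifs <;> constructor <;> omega

-- B in closed form: the validated path expands to p0 :: flatMap of the forward segments
theorem pvAltEq (p0 : Int × Int) (rest : List (Int × Int))
    (hpre : (((p0 :: rest).zip rest).all (fun pq => pq.1.1 == pq.2.1 || pq.1.2 == pq.2.2)) = true) :
    expand_to_unit_steps_alt (p0 :: rest)
      = p0 :: ((p0 :: rest).zip rest).flatMap (fun pq => pvSegFwd pq.1.1 pq.1.2 pq.2.1 pq.2.2) := by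
  rw [expand_to_unit_steps_alt]
  simp only [List.tail_cons]
  rw [if_pos hpre]
  rw [PySem.List.foldl_append_eq_flatMap]
  rw [List.nil_append, List.reverse_append, List.reverse_singleton, List.singleton_append,
    List.reverse_flatMap, List.reverse_reverse]
  congr 1
  apply pvFlatMapCongr
  intro pq hpq
  have hP := (List.all_eq_true.mp hpre) pq hpq
  have hR : pq.1.1 = pq.2.1 ∨ pq.1.2 = pq.2.2 := by
    rcases Bool.or_eq_true _ _ |>.mp hP with h | h
    · exact Or.inl (beq_iff_eq.mp h)
    · exact Or.inr (beq_iff_eq.mp h)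
  exact pvSegRevB_reverse _ _ _ _ hR

-- ===== VERDICT (by name: the statement is the Claim_ definition above) =====
theorem expand_to_unit_steps_spec : Claim_equal_expand_to_unit_steps := by
  intro path _ hpre
  unfold Spec_expand_to_unit_steps
  match path with
  | [] => rfl
  | p0 :: rest =>
    have hpre' : (((p0 :: rest).zip rest).all (fun pq => pq.1.1 == pq.2.1 || pq.1.2 == pq.2.2)) = true := by
      simpa [Pre_expand_to_unit_steps] using hpre
    rw [pvAltEq p0 rest hpre']
    have hA : expand_to_unit_steps (p0 :: rest) = pvLoopA [p0] (p0 :: rest) := rfl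
    rw [hA, pvLoopA_eq rest p0 [p0] hpre']
    rfl
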